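-- pv_equiv track=rewrite | github.com/amorsey/levenshtein-search | LevSearch.py | letter_dif
-- ===== SOURCE A (Python) =====
-- def letter_dif(word1, word2):
--     comp = {}
--     for l in word1:
--         if l not in comp:
--             comp[l] = 1
--         else:
--             comp[l] += 1
--     for l in word2:
--         if l not in comp:
--             comp[l] = -1
--         else:
--             comp[l] -= 1
--     difference = 0
--     for l in comp:
--         difference += abs(comp[l])
--     return difference
-- ===== SOURCE B (Python) =====
-- def letter_dif(word1, word2):
--     s1 = sorted(word1)
--     s2 = sorted(word2)
--     i = j = 0
--     diff = 0
--     while i < len(s1) and j < len(s2):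
--         if s1[i] == s2[j]:
--             i += 1
--             j += 1
--         elif s1[i] < s2[j]:
--             i += 1
--             diff += 1
--         else:
--             j += 1
--             diff += 1
--     return diff + (len(s1) - i) + (len(s2) - j)
-- ===== Notes on version B (the rewrite author's own statement) =====
-- stated objective: alternative
-- what changed: Replaces the letter-count dictionary and abs-difference sum by sorting both words and counting unmatched elements in a two-pointer merge of the sorted lists.
import Mathlib
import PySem

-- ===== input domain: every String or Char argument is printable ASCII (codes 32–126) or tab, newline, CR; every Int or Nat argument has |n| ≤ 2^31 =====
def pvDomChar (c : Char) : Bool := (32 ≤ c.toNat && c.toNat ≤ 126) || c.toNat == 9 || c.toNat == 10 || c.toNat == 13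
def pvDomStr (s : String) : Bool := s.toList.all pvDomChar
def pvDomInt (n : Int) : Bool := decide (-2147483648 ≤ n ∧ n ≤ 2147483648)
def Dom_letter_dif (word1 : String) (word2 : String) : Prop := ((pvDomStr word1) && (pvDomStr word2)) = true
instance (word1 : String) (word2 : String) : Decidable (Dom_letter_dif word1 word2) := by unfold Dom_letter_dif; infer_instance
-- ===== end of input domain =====

-- B replaces A's letter-count dictionary by a two-pointer merge of the two sorted words
-- counting unmatched elements (a genuinely different algorithm of similar cost).

-- ===== PORT A =====
-- literal transliteration of A: build the char->count dict over word1, subtract over word2,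
-- then sum abs(comp[l]) over the dict's keys in insertion order.
def letter_dif (word1 : String) (word2 : String) : Int :=
  let comp1 : PySem.Dict Char Int :=
    word1.toList.foldl
      (fun d l => if d.contains l = false then d.insert l 1 else d.insert l (d.getD l 0 + 1))
      PySem.Dict.empty
  let comp2 : PySem.Dict Char Int :=
    word2.toList.foldl
      (fun d l => if d.contains l = false then d.insert l (-1) else d.insert l (d.getD l 0 - 1))
      comp1
  comp2.keys.foldl (fun difference l => difference + |comp2.getD l 0|) 0

-- ===== PORT B =====
-- the while loop of Source B: i/j are represented by the unconsumed suffixes of s1/s2, diff is the accumulator;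
-- the two fallthrough cases return diff plus the remaining lengths, as Source B's final line does.
def ldGo : List Char → List Char → Int → Int
  | [], s2, diff => diff + s2.length
  | a :: t1, [], diff => diff + (a :: t1).length
  | a :: t1, b :: t2, diff =>
    if a = b then ldGo t1 t2 diff
    else if a < b then ldGo t1 (b :: t2) (diff + 1)
    else ldGo (a :: t1) t2 (diff + 1)
termination_by s1 s2 _ => s1.length + s2.length

def letter_dif_alt (word1 : String) (word2 : String) : Int :=
  ldGo (PySem.List.sorted word1.toList id) (PySem.List.sorted word2.toList id) 0

-- ===== PRECONDITION & SPEC =====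
def Spec_letter_dif (word1 : String) (word2 : String) (out : Int) : Prop := out = letter_dif_alt word1 word2
instance (word1 : String) (word2 : String) (out : Int) : Decidable (Spec_letter_dif word1 word2 out) := by unfold Spec_letter_dif; infer_instance

-- ===== CLAIM (what is proved, stated in full; the proofs are below) =====
def Claim_equal_letter_dif : Prop := ∀ (word1 : String) (word2 : String), Dom_letter_dif word1 word2 → Spec_letter_dif word1 word2 (letter_dif word1 word2)

-- ===== LEMMAS AND PROOFS =====

-- A's first loop: the not-in branch inserts 1 = getD + 1 because a missing key has getD 0,
-- so the loop is exactly Counter(word1).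
lemma loop1_eq_counter (l : List Char) :
    l.foldl
      (fun d x => if d.contains x = false then d.insert x 1 else d.insert x (d.getD x 0 + 1))
      PySem.Dict.empty = PySem.Dict.counter l := by
  have hf : (fun (d : PySem.Dict Char Int) x =>
      if d.contains x = false then d.insert x 1 else d.insert x (d.getD x 0 + 1))
      = fun d x => d.insert x (d.getD x 0 + 1) := by
    funext d x
    rcases h : d.contains x with _ | _
    · simp [PySem.Dict.getD_of_not_contains d 0 h]
    · simp
  rw [hf, PySem.Dict.foldl_insert_getD_add_one_eq_counter]

-- A's second loop likewise always inserts getD - 1.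
lemma loop2_eq (l : List Char) (d : PySem.Dict Char Int) :
    l.foldl
      (fun d x => if d.contains x = false then d.insert x (-1) else d.insert x (d.getD x 0 - 1))
      d = l.foldl (fun d x => d.insert x (d.getD x 0 - 1)) d := by
  have hf : (fun (d : PySem.Dict Char Int) x =>
      if d.contains x = false then d.insert x (-1) else d.insert x (d.getD x 0 - 1))
      = fun d x => d.insert x (d.getD x 0 - 1) := by
    funext d x
    rcases h : d.contains x with _ | _
    · simp [PySem.Dict.getD_of_not_contains d 0 h]
    · simp
  rw [hf]

lemma getD_foldl_sub (l : List Char) (d : PySem.Dict Char Int) (k : Char) :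
    (l.foldl (fun d x => d.insert x (d.getD x 0 - 1)) d).getD k 0
      = d.getD k 0 - l.count k := by
  induction l generalizing d with
  | nil => simp
  | cons a t ih =>
    simp only [List.foldl_cons, ih, List.count_cons]
    by_cases hk : a = k
    · subst hk; simp [PySem.Dict.getD_insert_self]; ring
    · rw [PySem.Dict.getD_insert_of_ne _ _ _ (Ne.symm hk)]
      simp [hk]

-- the sum of counts of a multiset over any nodup list of chars covering its support is its card
lemma sum_counts (K : List Char) (hK : K.Nodup) (m : Multiset Char)
    (hm : ∀ a ∈ m, a ∈ K) :
    (K.map (fun k => (m.count k : Int))).sum = (m.card : Int) := by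
  rw [← List.sum_toFinset _ hK]
  have h1 : ∑ k ∈ K.toFinset, ((m.count k : Int)) = ((∑ k ∈ K.toFinset, m.count k : ℕ) : Int) := by
    push_cast; rfl
  rw [h1]
  have h2 : ∑ k ∈ K.toFinset, m.count k = m.card := by
    rw [← Multiset.toFinset_sum_count_eq m]
    refine (Finset.sum_subset ?_ ?_).symm
    · intro x hx
      simp only [List.mem_toFinset]
      exact hm x (by simpa using hx)
    · intro x _ hx
      simp only [Multiset.mem_toFinset] at hx
      exact Multiset.count_eq_zero_of_notMem (by simpa using hx)
  rw [h2]

-- A's result in closed form: |w1| + |w2| - 2·|w1 ∩ w2| (multiset intersection)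
lemma letter_dif_closed (word1 word2 : String) :
    letter_dif word1 word2
      = (word1.toList.length : Int) + word2.toList.length
        - 2 * ((↑word1.toList ∩ ↑word2.toList : Multiset Char)).card := by
  unfold letter_dif
  simp only [loop1_eq_counter, loop2_eq]
  set l1 := word1.toList
  set l2 := word2.toList
  set d2 := l2.foldl (fun d x => d.insert x (d.getD x 0 - 1)) (PySem.Dict.counter l1) with hd2
  have hget : ∀ k, d2.getD k 0 = (l1.count k : Int) - l2.count k := by
    intro k
    rw [hd2, getD_foldl_sub, PySem.Dict.getD_counter]
  have hkeys : d2.keys = PySem.Set.update (PySem.Set.ofList l1) l2 := by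
    rw [hd2, PySem.Dict.keys_foldl_insert, PySem.Dict.keys_counter]
  have hnd : d2.keys.Nodup := by
    rw [hkeys]; exact PySem.Set.nodup_update _ _ (PySem.Set.nodup_ofList l1)
  have hmem : ∀ a : Char, a ∈ l1 ∨ a ∈ l2 → a ∈ d2.keys := by
    intro a ha
    rw [hkeys, PySem.Set.mem_update]
    rcases ha with h | h
    · exact Or.inl ((PySem.Set.mem_ofList l1 a).mpr h)
    · exact Or.inr h
  rw [PySem.List.foldl_add, zero_add]
  have habs : ∀ k : Char, |d2.getD k 0|
      = ((l1.count k : Int) + l2.count k) - 2 * ((↑l1 ∩ ↑l2 : Multiset Char)).count k := by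
    intro k
    rw [hget k]
    rw [Multiset.count_inter]
    simp only [Multiset.coe_count]
    rcases le_total (l1.count k) (l2.count k) with h | h
    · rw [abs_of_nonpos (by omega), min_eq_left h]; ring
    · rw [abs_of_nonneg (by omega), min_eq_right h]; ring
  have hmap : d2.keys.map (fun k => |d2.getD k 0|)
      = d2.keys.map (fun k => ((l1.count k : Int) + l2.count k)
          - 2 * ((↑l1 ∩ ↑l2 : Multiset Char)).count k) := by
    exact List.map_congr_left (fun k _ => habs k)
  rw [hmap]
  have hsplit : (d2.keys.map (fun k => ((l1.count k : Int) + l2.count k)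
          - 2 * ((↑l1 ∩ ↑l2 : Multiset Char)).count k)).sum
      = (d2.keys.map (fun k => (l1.count k : Int))).sum
        + (d2.keys.map (fun k => (l2.count k : Int))).sum
        - 2 * (d2.keys.map (fun k => (((↑l1 ∩ ↑l2 : Multiset Char)).count k : Int))).sum := by
    induction d2.keys with
    | nil => simp
    | cons a t ih => simp only [List.map_cons, List.sum_cons, ih]; ring
  rw [hsplit]
  have e1 : (d2.keys.map (fun k => (l1.count k : Int))).sum = (l1.length : Int) := by
    have := sum_counts d2.keys hnd (↑l1) (fun a ha => hmem a (Or.inl (by simpa using ha)))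
    simpa using this
  have e2 : (d2.keys.map (fun k => (l2.count k : Int))).sum = (l2.length : Int) := by
    have := sum_counts d2.keys hnd (↑l2) (fun a ha => hmem a (Or.inr (by simpa using ha)))
    simpa using this
  have e3 : (d2.keys.map (fun k => (((↑l1 ∩ ↑l2 : Multiset Char)).count k : Int))).sum
      = (((↑l1 ∩ ↑l2 : Multiset Char)).card : Int) := by
    refine sum_counts d2.keys hnd _ (fun a ha => ?_)
    have : a ∈ (↑l1 : Multiset Char) := Multiset.mem_of_le Multiset.inter_le_left ha
    exact hmem a (Or.inl (by simpa using this))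
  rw [e1, e2, e3]

-- the merge counts |s1| + |s2| - 2·|s1 ∩ s2| on sorted inputs
lemma ldGo_closed (s1 s2 : List Char) (h1 : s1.Pairwise (· ≤ ·)) (h2 : s2.Pairwise (· ≤ ·))
    (diff : Int) :
    ldGo s1 s2 diff
      = diff + s1.length + s2.length - 2 * ((↑s1 ∩ ↑s2 : Multiset Char)).card := by
  induction s1, s2, diff using ldGo.induct with
  | case1 s2 diff => simp [ldGo]
  | case2 a t1 diff => simp [ldGo]
  | case3 t1 b t2 diff ih =>
    rw [ldGo, if_pos rfl]
    rw [ih h1.tail h2.tail]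
    have hint : (↑(b :: t1) ∩ ↑(b :: t2) : Multiset Char) = b ::ₘ ((↑t1 ∩ ↑t2 : Multiset Char)) := by
      show (b ::ₘ ↑t1) ∩ (b ::ₘ ↑t2) = b ::ₘ (↑t1 ∩ ↑t2)
      rw [Multiset.cons_inter_of_pos _ (Multiset.mem_cons_self b _), Multiset.erase_cons_head]
    rw [hint]
    simp; ring
  | case4 a t1 b t2 diff hab halt ih =>
    rw [ldGo]
    rw [if_neg hab, if_pos halt]
    rw [ih h1.tail h2]
    have hnotmem : a ∉ (↑(b :: t2) : Multiset Char) := by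
      simp only [Multiset.mem_coe, List.mem_cons]
      rintro (rfl | hmem)
      · exact hab rfl
      · exact absurd halt (not_lt.mpr ((List.pairwise_cons.mp h2).1 _ hmem))
    have hint : (↑(a :: t1) ∩ ↑(b :: t2) : Multiset Char) = (↑t1 ∩ ↑(b :: t2) : Multiset Char) := by
      show (a ::ₘ ↑t1) ∩ _ = _
      rw [Multiset.cons_inter_of_neg _ hnotmem]
    rw [hint]
    simp; ring
  | case5 a t1 b t2 diff hab halt ih =>
    rw [ldGo]
    rw [if_neg hab, if_neg halt]
    rw [ih h1 h2.tail]
    have hba : b < a := lt_of_le_of_ne (not_lt.mp halt) (fun h => hab h.symm)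
    have hnotmem : b ∉ (↑(a :: t1) : Multiset Char) := by
      simp only [Multiset.mem_coe, List.mem_cons]
      rintro (rfl | hmem)
      · exact hab rfl
      · exact absurd hba (not_lt.mpr ((List.pairwise_cons.mp h1).1 _ hmem))
    have hint : (↑(a :: t1) ∩ ↑(b :: t2) : Multiset Char) = (↑(a :: t1) ∩ ↑t2 : Multiset Char) :=
      calc (↑(a :: t1) ∩ ↑(b :: t2) : Multiset Char)
          = (↑(b :: t2) ∩ ↑(a :: t1) : Multiset Char) := Multiset.inter_comm _ _
        _ = ((↑t2 : Multiset Char) ∩ ↑(a :: t1)) := by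
            show (b ::ₘ (↑t2 : Multiset Char)) ∩ _ = _
            rw [Multiset.cons_inter_of_neg _ hnotmem]
        _ = (↑(a :: t1) ∩ ↑t2 : Multiset Char) := Multiset.inter_comm _ _
    rw [hint]
    simp; ring

lemma letter_dif_alt_closed (word1 word2 : String) :
    letter_dif_alt word1 word2
      = (word1.toList.length : Int) + word2.toList.length
        - 2 * ((↑word1.toList ∩ ↑word2.toList : Multiset Char)).card := by
  unfold letter_dif_alt
  have p1 := PySem.List.sorted_perm word1.toList id false
  have p2 := PySem.List.sorted_perm word2.toList id false
  rw [ldGo_closed _ _ (by simpa using PySem.List.sorted_pairwise word1.toList id)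
        (by simpa using PySem.List.sorted_pairwise word2.toList id) 0]
  rw [p1.length_eq, p2.length_eq, Multiset.coe_eq_coe.mpr p1, Multiset.coe_eq_coe.mpr p2]
  ring

-- ===== VERDICT (by name: the statement is the Claim_ definition above) =====
theorem letter_dif_spec : Claim_equal_letter_dif := by
  intro word1 word2 _
  unfold Spec_letter_dif
  rw [letter_dif_closed, letter_dif_alt_closed]
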